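-- pv_equiv track=rewrite | github.com/KNNGuess/KNNGuess-code | utils.py | get_segment
-- ===== SOURCE A (Python) =====
-- def get_segment(pw):
--     res=""
--     for chr in pw:
--         if chr.isalpha():
--             res+="L"
--         elif chr.isdigit():
--             res+="D"
--         else:
--             res+="S"
--     cnt=0
--     ans=[]
--     for i in range(len(res)):
--         cnt+=1
--         if i+1==len(res) or res[i]!=res[i+1]:
--             ans.append((res[i],pw[i-cnt+1:i+1]))
--             cnt=0
--     return ans
-- ===== SOURCE B (Python) =====
-- def get_segment(pw):
--     def classify(c):
--         if c.isalpha():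
--             return "L"
--         if c.isdigit():
--             return "D"
--         return "S"
--     ans = []
--     i, n = 0, len(pw)
--     while i < n:
--         k = classify(pw[i])
--         j = i + 1
--         while j < n and classify(pw[j]) == k:
--             j += 1
--         ans.append((k, pw[i:j]))
--         i = j
--     return ans
-- ===== Notes on version B (the rewrite author's own statement) =====
-- stated objective: simpler
-- what changed: B replaces A's intermediate class string plus index/counter boundary scan with a single two-pointer run scan that classifies on the fly and slices each maximal run directly.
import Mathlib
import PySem

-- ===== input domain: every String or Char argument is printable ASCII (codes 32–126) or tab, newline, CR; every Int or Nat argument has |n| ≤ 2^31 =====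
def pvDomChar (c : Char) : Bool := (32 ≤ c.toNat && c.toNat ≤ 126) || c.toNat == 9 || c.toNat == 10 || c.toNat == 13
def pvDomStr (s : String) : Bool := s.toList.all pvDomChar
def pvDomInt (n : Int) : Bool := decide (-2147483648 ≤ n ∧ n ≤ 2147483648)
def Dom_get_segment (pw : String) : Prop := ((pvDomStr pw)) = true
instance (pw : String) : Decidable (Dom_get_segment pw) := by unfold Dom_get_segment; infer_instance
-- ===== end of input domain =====

-- B replaces A's class-string + counter/index boundary scan with a single two-pointer run scan (simpler decomposition; same cost).

-- ===== PORT A =====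
def get_segment (pw : String) : List (String × String) :=
  -- res = "" ; for chr in pw: res += "L"/"D"/"S"
  let res : List Char := pw.toList.foldl (fun r c =>
    if PySem.Chars.isalpha c then r ++ ['L']
    else if PySem.Chars.isdigit c then r ++ ['D']
    else r ++ ['S']) []
  -- cnt=0; ans=[]; for i in range(len(res)): …
  ((PySem.List.pyRange 0 (res.length : Int) 1).foldl
    (fun (st : Int × List (String × String)) (i : Int) =>
      let cnt := st.1 + 1
      if ((i + 1 : Int) == (res.length : Int)) ||
         (PySem.List.pyGetD res i ' ' != PySem.List.pyGetD res (i + 1) ' ') then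
        (0, st.2 ++ [(String.ofList [PySem.List.pyGetD res i ' '],
          String.ofList (PySem.List.slice pw.toList (some (i - cnt + 1)) (some (i + 1))))])
      else (cnt, st.2))
    ((0 : Int), ([] : List (String × String)))).2

-- ===== PORT B =====
-- classify(c) from Source B
def pvClassify (c : Char) : Char :=
  if PySem.Chars.isalpha c then 'L'
  else if PySem.Chars.isdigit c then 'D'
  else 'S'

-- the two-pointer while loop of Source B: the inner while is takeWhile over the tail, pw[i:j] = head :: run
def pvSegAlt : List Char → List (String × String)
  | [] => []
  | c :: rest =>
    let k := pvClassify c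
    let run := rest.takeWhile (fun d => pvClassify d == k)
    (String.ofList [k], String.ofList (c :: run)) :: pvSegAlt (rest.dropWhile (fun d => pvClassify d == k))
  termination_by l => l.length
  decreasing_by
    simp only [List.length_cons]
    exact Nat.lt_succ_of_le (List.length_dropWhile_le _ _)

def get_segment_alt (pw : String) : List (String × String) :=
  pvSegAlt pw.toList

-- ===== PRECONDITION & SPEC =====
def Spec_get_segment (pw : String) (out : List (String × String)) : Prop := out = get_segment_alt pw
instance (pw : String) (out : List (String × String)) : Decidable (Spec_get_segment pw out) := by unfold Spec_get_segment; infer_instance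

-- ===== CLAIM (what is proved, stated in full; the proofs are below) =====
def Claim_equal_get_segment : Prop := ∀ (pw : String), Dom_get_segment pw → Spec_get_segment pw (get_segment pw)

-- ===== LEMMAS AND PROOFS =====

-- reference recursion capturing A's second loop: pend = the cnt chars counted since the last boundary
def pvSpecA : List Char → List Char → List (String × String)
  | _, [] => []
  | pend, [r] => [(String.ofList [pvClassify r], String.ofList (pend ++ [r]))]
  | pend, r :: r' :: rest =>
    if pvClassify r = pvClassify r' then pvSpecA (pend ++ [r]) (r' :: rest)
    else (String.ofList [pvClassify r], String.ofList (pend ++ [r])) :: pvSpecA [] (r' :: rest)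

-- A's first loop builds exactly the classification map
lemma pv_foldl_classify (cs : List Char) (acc : List Char) :
    cs.foldl (fun r c =>
      if PySem.Chars.isalpha c then r ++ ['L']
      else if PySem.Chars.isdigit c then r ++ ['D']
      else r ++ ['S']) acc = acc ++ cs.map pvClassify := by
  induction cs generalizing acc with
  | nil => simp
  | cons c cs ih =>
    simp only [List.foldl_cons, ih, List.map_cons]
    have h : (if PySem.Chars.isalpha c then acc ++ ['L']
        else if PySem.Chars.isdigit c then acc ++ ['D']
        else acc ++ ['S']) = acc ++ [pvClassify c] := by
      unfold pvClassify; split_ifs <;> rfl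
    rw [h]; simp

lemma pv_getD_mid {α : Type} [Inhabited α] (A B : List α) (y : α) (d : α) :
    PySem.List.pyGetD (A ++ y :: B) ((A.length : Int)) d = y := by
  simp [PySem.List.pyGetD_natCast, List.getD_eq_getElem?_getD]

lemma pv_getD_mid1 {α : Type} [Inhabited α] (A B : List α) (y z : α) (d : α) :
    PySem.List.pyGetD (A ++ y :: z :: B) ((A.length : Int) + 1) d = z := by
  have h : A ++ y :: z :: B = (A ++ [y]) ++ z :: B := by simp
  have h2 : ((A.length : Int) + 1) = (((A ++ [y]).length : Nat) : Int) := by simp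
  rw [h, h2]; exact pv_getD_mid _ _ _ _

-- the slice A emits at a boundary is exactly the pending run plus the boundary char
lemma pv_slice_run (done pend tail : List Char) (r : Char) :
    PySem.List.slice (done ++ pend ++ r :: tail)
      (some (((done.length + pend.length : Nat) : Int) - (((pend.length : Nat) : Int) + 1) + 1))
      (some (((done.length + pend.length : Nat) : Int) + 1)) = pend ++ [r] := by
  have h1 : (((done.length + pend.length : Nat) : Int) - (((pend.length : Nat) : Int) + 1) + 1)
      = ((done.length : Nat) : Int) := by push_cast; ring
  have h2 : (((done.length + pend.length : Nat) : Int) + 1)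
      = ((done.length : Nat) : Int) + ((pend.length + 1 : Nat) : Int) := by push_cast; ring
  rw [h1, h2, PySem.List.slice_natCast_add,
      show done ++ pend ++ r :: tail = done ++ (pend ++ r :: tail : List Char) by simp,
      List.drop_left, List.take_append]
  simp

-- invariant of A's index loop: from a state where cnt counts the pending run, it appends pvSpecA pend rest
lemma pv_core (rest : List Char) : ∀ (done pend cs : List Char) (ans : List (String × String)),
    cs = done ++ pend ++ rest →
    ((PySem.List.pyRange ((done.length + pend.length : Nat) : Int) ((cs.length : Nat) : Int) 1).foldl
      (fun (st : Int × List (String × String)) (i : Int) =>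
        if ((i + 1 : Int) == ((cs.length : Nat) : Int) ||
           (PySem.List.pyGetD (cs.map pvClassify) i ' ' !=
            PySem.List.pyGetD (cs.map pvClassify) (i + 1) ' ')) = true then
          (0, st.2 ++ [(String.ofList [PySem.List.pyGetD (cs.map pvClassify) i ' '],
            String.ofList (PySem.List.slice cs (some (i - (st.1 + 1) + 1)) (some (i + 1))))])
        else (st.1 + 1, st.2))
      ((pend.length : Int), ans)).2 = ans ++ pvSpecA pend rest := by
  induction rest with
  | nil =>
    intro done pend cs ans hcs
    have hn : cs.length = done.length + pend.length := by subst hcs; simp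
    rw [hn, PySem.List.pyRange_one_eq_nil (le_refl _)]
    simp [pvSpecA]
  | cons r rest' ih =>
    intro done pend cs ans hcs
    have hn : cs.length = done.length + pend.length + 1 + rest'.length := by
      subst hcs; simp; omega
    have hlt : ((done.length + pend.length : Nat) : Int) < ((cs.length : Nat) : Int) := by
      rw [hn]; push_cast; omega
    rw [PySem.List.pyRange_one_cons hlt, List.foldl_cons]
    have hAlen : done.length + pend.length = ((done ++ pend).map pvClassify).length := by simp
    cases rest' with
    | nil =>
      have hmap : cs.map pvClassify
          = (done ++ pend).map pvClassify ++ pvClassify r :: ([] : List Char).map pvClassify := by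
        subst hcs; simp
      have e1 : PySem.List.pyGetD (cs.map pvClassify) ((done.length + pend.length : Nat) : Int) ' '
          = pvClassify r := by
        rw [hmap, hAlen]; exact pv_getD_mid _ _ _ _
      have hcond : ((((done.length + pend.length : Nat) : Int) + 1 : Int) == ((cs.length : Nat) : Int)) = true := by
        simp [hn]
      have hnil : PySem.List.pyRange (((done.length + pend.length : Nat) : Int) + 1) ((cs.length : Nat) : Int) 1 = [] := by
        apply PySem.List.pyRange_one_eq_nil
        simp only [List.length_nil, Nat.add_zero] at hn
        rw [hn]; push_cast; omega
      simp only [hcond, Bool.true_or, if_pos, e1, hnil, List.foldl_nil]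
      rw [hcs, pv_slice_run]
      simp [pvSpecA]
    | cons r' rest'' =>
      have hmap : cs.map pvClassify
          = (done ++ pend).map pvClassify ++ pvClassify r :: pvClassify r' :: rest''.map pvClassify := by
        subst hcs; simp
      have e1 : PySem.List.pyGetD (cs.map pvClassify) ((done.length + pend.length : Nat) : Int) ' '
          = pvClassify r := by
        rw [hmap, hAlen]; exact pv_getD_mid _ _ _ _
      have e2 : PySem.List.pyGetD (cs.map pvClassify) (((done.length + pend.length : Nat) : Int) + 1) ' '
          = pvClassify r' := by
        rw [hmap, hAlen]; exact pv_getD_mid1 _ _ _ _ _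
      have hcond : ((((done.length + pend.length : Nat) : Int) + 1 : Int) == ((cs.length : Nat) : Int)) = false := by
        simp [hn]; omega
      by_cases hrr : pvClassify r = pvClassify r'
      · have hb : (pvClassify r != pvClassify r') = false := by simp [hrr]
        simp only [hcond, e1, e2, hb, Bool.or_self, if_neg, Bool.false_eq_true, not_false_eq_true]
        have hshift : (((done.length + pend.length : Nat) : Int) + 1)
            = ((done.length + (pend ++ [r]).length : Nat) : Int) := by simp; ring
        have hst : ((pend.length : Nat) : Int) + 1 = (((pend ++ [r]).length : Nat) : Int) := by
          simp
        rw [hshift, hst, ih done (pend ++ [r]) cs ans (by rw [hcs]; simp)]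
        have h : pvSpecA pend (r :: r' :: rest'') = pvSpecA (pend ++ [r]) (r' :: rest'') := by
          simp [pvSpecA, hrr]
        rw [h]
      · have hb : (pvClassify r != pvClassify r') = true := by simp [hrr]
        simp only [hcond, e1, e2, hb, Bool.false_or, if_pos]
        rw [hcs, pv_slice_run]
        have hshift : (((done.length + pend.length : Nat) : Int) + 1)
            = (((done ++ pend ++ [r]).length : Nat) : Int) := by
          simp; ring
        have IH := ih (done ++ pend ++ [r]) [] cs
          (ans ++ [(String.ofList [pvClassify r], String.ofList (pend ++ [r]))])
          (by rw [hcs]; simp)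
        simp only [List.length_nil, Nat.add_zero, Nat.cast_zero] at IH
        rw [← hcs, hshift, IH]
        have h : pvSpecA pend (r :: r' :: rest'') =
            (String.ofList [pvClassify r], String.ofList (pend ++ [r])) :: pvSpecA [] (r' :: rest'') := by
          simp [pvSpecA, hrr]
        rw [h]
        simp

-- A's loop result, read off against B's run recursion
lemma pv_specA_eq (rest : List Char) : ∀ (pend : List Char) (c : Char),
    (∀ x ∈ pend, pvClassify x = pvClassify c) →
    pvSpecA pend (c :: rest) =
      (String.ofList [pvClassify c],
       String.ofList (pend ++ c :: rest.takeWhile (fun d => pvClassify d == pvClassify c))) ::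
      pvSegAlt (rest.dropWhile (fun d => pvClassify d == pvClassify c)) := by
  induction rest with
  | nil => intro pend c h; simp [pvSpecA, pvSegAlt]
  | cons r rest ih =>
    intro pend c h
    by_cases hc : pvClassify c = pvClassify r
    · rw [show pvSpecA pend (c :: r :: rest) = pvSpecA (pend ++ [c]) (r :: rest) by
        simp [pvSpecA, hc]]
      rw [ih (pend ++ [c]) r (by
        intro x hx
        rcases List.mem_append.1 hx with hx | hx
        · rw [h x hx, hc]
        · simp at hx; rw [hx]; exact hc)]
      have hbeq : (pvClassify r == pvClassify c) = true := by simp [hc.symm]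
      have ht : List.takeWhile (fun d => pvClassify d == pvClassify c) (r :: rest)
          = r :: List.takeWhile (fun d => pvClassify d == pvClassify r) rest := by
        rw [List.takeWhile_cons, hbeq, hc]; rfl
      have hd : List.dropWhile (fun d => pvClassify d == pvClassify c) (r :: rest)
          = List.dropWhile (fun d => pvClassify d == pvClassify r) rest := by
        rw [List.dropWhile_cons, hbeq, hc]; rfl
      rw [ht, hd, hc]
      simp
    · rw [show pvSpecA pend (c :: r :: rest) =
          (String.ofList [pvClassify c], String.ofList (pend ++ [c])) :: pvSpecA [] (r :: rest) by
        simp [pvSpecA, hc]]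
      rw [ih [] r (by simp)]
      have hbeq : (pvClassify r == pvClassify c) = false := by
        simp; exact fun h' => hc h'.symm
      have ht : List.takeWhile (fun d => pvClassify d == pvClassify c) (r :: rest) = [] := by
        rw [List.takeWhile_cons, hbeq]; rfl
      have hd : List.dropWhile (fun d => pvClassify d == pvClassify c) (r :: rest) = r :: rest := by
        rw [List.dropWhile_cons, hbeq]; rfl
      rw [ht, hd]
      rw [show pvSegAlt (r :: rest) =
        (String.ofList [pvClassify r], String.ofList (r :: rest.takeWhile (fun d => pvClassify d == pvClassify r))) ::
          pvSegAlt (rest.dropWhile (fun d => pvClassify d == pvClassify r)) from by rw [pvSegAlt.eq_def]]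
      simp

-- ===== VERDICT (by name: the statement is the Claim_ definition above) =====
theorem get_segment_spec : Claim_equal_get_segment := by
  intro pw _
  unfold Spec_get_segment get_segment get_segment_alt
  simp only [pv_foldl_classify, List.nil_append, List.length_map]
  have h := pv_core pw.toList [] [] pw.toList [] (by simp)
  simp only [List.length_nil, Nat.add_zero, Nat.cast_zero] at h
  rw [h]
  cases hcs : pw.toList with
  | nil => simp [pvSpecA, pvSegAlt]
  | cons c rest =>
    rw [pv_specA_eq rest [] c (by simp)]
    rw [show pvSegAlt (c :: rest) =
      (String.ofList [pvClassify c], String.ofList (c :: rest.takeWhile (fun d => pvClassify d == pvClassify c))) ::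
        pvSegAlt (rest.dropWhile (fun d => pvClassify d == pvClassify c)) from by rw [pvSegAlt.eq_def]]
    simp
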